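-- pv_equiv track=rewrite | github.com/roy-van-dijk/iscrip | assignments_2/gsmoniemen.py | T9
-- ===== SOURCE A (Python) =====
-- def T9(word):
--     # Key layout on a T9 keyboard stored as an array
--     keys = ["abc", "def", "ghi", "jkl", "mno", "pqrs", "tuv", "wxyz"]
--     # Transform given word to lowercase
--     word = word.lower()
--     # Initialise combination string to be filled by the sequence
--     combination = ""
--     # Index will be the physical number key to be pressed by the user
--     # Starts at 2 because the array above stars at 0 AND the T9 keys
--     # start with 'abc' at key number 2
--     index = 2
--
--     # Loop through each letter in the given word
--     for letter in word:
--         # Loop through each key in the keys array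
--         for key in keys:
--             # If the current letter is inside of the key
--             if letter in key:
--                 # Add the current index (physical number key) to the
--                 # result sequence
--                 combination += str(index)
--             # If the current letter is not in this key, add 1 to the
--             # index (key to be pressed)
--             index += 1
--         # After this letter has been checked, reset index back to 2
--         index = 2
--
--     # Return the T9 sequence
--     return combination
-- ===== SOURCE B (Python) =====
-- def T9(word):
--     # Pure arithmetic: the digit for a letter is a closed form of its char code.
--     # Letters map uniformly in groups of 3 from 'a', except that the 4-letter
--     # keys pqrs and wxyz shift everything after 'r' and after 'y' by one.
--     out = []
--     for c in word.lower():
--         o = ord(c) - ord('a')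
--         if 0 <= o <= 25:
--             out.append(str(2 + (o - (o > 17) - (o > 24)) // 3))
--     return ''.join(out)
-- ===== Notes on version B (the rewrite author's own statement) =====
-- stated objective: alternative
-- what changed: Replaces the per-letter scan over the eight key strings (with a manually reset index counter) by a table-free arithmetic closed form: the digit is computed directly from the letter's char code as 2 + (o - (o>17) - (o>24)) // 3 with o = ord(c) - 97, correcting for the two 4-letter keys.
import Mathlib
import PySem

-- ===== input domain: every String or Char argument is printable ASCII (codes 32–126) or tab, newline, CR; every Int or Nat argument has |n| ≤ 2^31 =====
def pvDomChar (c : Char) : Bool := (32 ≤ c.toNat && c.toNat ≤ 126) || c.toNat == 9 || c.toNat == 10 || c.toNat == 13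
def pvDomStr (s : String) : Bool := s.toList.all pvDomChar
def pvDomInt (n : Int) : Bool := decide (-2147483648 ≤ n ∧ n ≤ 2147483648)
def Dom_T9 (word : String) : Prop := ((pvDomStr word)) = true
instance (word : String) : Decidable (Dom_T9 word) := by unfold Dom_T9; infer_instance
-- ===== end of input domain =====

-- B drops the key table entirely: the digit is an arithmetic closed form of the letter's char code; same return value as A.

-- ===== PORT A =====
-- keys = ["abc", ..., "wxyz"], as lists of chars ('letter in key' is char membership)
def t9Keys : List (List Char) :=
  [['a','b','c'], ['d','e','f'], ['g','h','i'], ['j','k','l'],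
   ['m','n','o'], ['p','q','r','s'], ['t','u','v'], ['w','x','y','z']]

def T9 (word : String) : String :=
  let word := PySem.Str.lower word
  let combination : List Char :=
    word.toList.foldl (fun combination letter =>
      -- inner loop over keys carrying the (combination, index) state; index reset to 2 per letter
      (t9Keys.foldl (fun (p : List Char × Int) key =>
          (if key.contains letter then p.1 ++ PySem.Int.toChars p.2 else p.1, p.2 + 1))
        (combination, 2)).1) []
  String.ofList combination

-- ===== PORT B =====
-- o = ord(c) - ord('a'); if 0 <= o <= 25: append str(2 + (o - (o>17) - (o>24)) // 3)
def t9Step (out : List Char) (c : Char) : List Char :=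
  let o : Int := (c.toNat : Int) - 97
  if 0 ≤ o ∧ o ≤ 25 then
    out ++ PySem.Int.toChars
      (2 + PySem.Int.floordiv (o - (if 17 < o then 1 else 0) - (if 24 < o then 1 else 0)) 3)
  else out

def T9_alt (word : String) : String :=
  String.ofList ((PySem.Str.lower word).toList.foldl t9Step [])

-- ===== PRECONDITION & SPEC =====
def Spec_T9 (word : String) (out : String) : Prop := out = T9_alt word
instance (word : String) (out : String) : Decidable (Spec_T9 word out) := by unfold Spec_T9; infer_instance

-- ===== CLAIM (what is proved, stated in full; the proofs are below) =====
def Claim_equal_T9 : Prop := ∀ (word : String), Dom_T9 word → Spec_T9 word (T9 word)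

-- ===== LEMMAS AND PROOFS =====

-- A's inner fold only APPENDS to the accumulator, so it factors as 'comb ++ delta'
lemma t9_delta (keys : List (List Char)) (c : Char) (comb : List Char) (i : Int) :
    (keys.foldl (fun (p : List Char × Int) key =>
        (if key.contains c then p.1 ++ PySem.Int.toChars p.2 else p.1, p.2 + 1)) (comb, i)).1
    = comb ++ (keys.foldl (fun (p : List Char × Int) key =>
        (if key.contains c then p.1 ++ PySem.Int.toChars p.2 else p.1, p.2 + 1)) ([], i)).1 := by
  induction keys generalizing comb i with
  | nil => simp
  | cons k ks ih =>
    simp only [List.foldl_cons]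
    by_cases h : k.contains c
    · simp only [h, if_true]
      rw [ih, ih ([] ++ PySem.Int.toChars i)]
      simp
    · simp only [h, Bool.false_eq_true, if_false]
      rw [ih]

-- B's step likewise factors as 'comb ++ delta'
lemma t9_step_delta (c : Char) (comb : List Char) :
    t9Step comb c = comb ++ t9Step [] c := by
  simp only [t9Step]
  split_ifs <;> simp

-- a char whose code lies in 97..122 IS one of the 26 lowercase letters
lemma t9_char_mem (c : Char) (h1 : 97 ≤ c.toNat) (h2 : c.toNat ≤ 122) :
    c ∈ (['a','b','c','d','e','f','g','h','i','j','k','l','m',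
          'n','o','p','q','r','s','t','u','v','w','x','y','z'] : List Char) := by
  have hv : Char.ofNat c.toNat = c := Char.ofNat_toNat c
  interval_cases h : c.toNat <;> rw [← hv] <;> decide

-- for each of the 26 letters, A's key scan produces exactly B's arithmetic digit
lemma t9_letter_case (c : Char)
    (hc : c ∈ (['a','b','c','d','e','f','g','h','i','j','k','l','m',
                'n','o','p','q','r','s','t','u','v','w','x','y','z'] : List Char)) :
    (t9Keys.foldl (fun (p : List Char × Int) key =>
        (if key.contains c then p.1 ++ PySem.Int.toChars p.2 else p.1, p.2 + 1))
      ([], 2)).1 = t9Step [] c := by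
  fin_cases hc <;> rfl

-- a non-letter is on no key, so A's key scan appends nothing
lemma t9_nonletter_case (c : Char)
    (hc : ¬ c ∈ (['a','b','c','d','e','f','g','h','i','j','k','l','m',
                  'n','o','p','q','r','s','t','u','v','w','x','y','z'] : List Char)) :
    (t9Keys.foldl (fun (p : List Char × Int) key =>
        (if key.contains c then p.1 ++ PySem.Int.toChars p.2 else p.1, p.2 + 1))
      ([], 2)).1 = [] := by
  have hk : ∀ k ∈ t9Keys, k.contains c = false := by
    intro k hk
    rw [List.contains_eq_mem, decide_eq_false_iff_not]
    intro hmem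
    apply hc
    fin_cases hk <;> simp_all
  revert hk
  generalize (2:Int) = i
  induction t9Keys generalizing i with
  | nil => intro _; rfl
  | cons k ks ih =>
    intro hk
    simp only [List.foldl_cons, hk k (by simp), Bool.false_eq_true, if_false]
    exact ih _ (fun k' h' => hk k' (List.mem_cons_of_mem _ h'))

-- per-letter agreement: A's inner key scan appends exactly what B's arithmetic step appends
lemma t9_inner (comb : List Char) (c : Char) :
    (t9Keys.foldl (fun (p : List Char × Int) key =>
        (if key.contains c then p.1 ++ PySem.Int.toChars p.2 else p.1, p.2 + 1))
      (comb, 2)).1 = t9Step comb c := by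
  rw [t9_delta, t9_step_delta]
  by_cases hc : c ∈ (['a','b','c','d','e','f','g','h','i','j','k','l','m',
                      'n','o','p','q','r','s','t','u','v','w','x','y','z'] : List Char)
  · rw [t9_letter_case c hc]
  · rw [t9_nonletter_case c hc]
    have hB : t9Step [] c = [] := by
      simp only [t9Step]
      rw [if_neg]
      intro h
      exact hc (t9_char_mem c (by omega) (by omega))
    rw [hB]

-- the two outer folds agree because the per-letter steps agree
lemma t9_outer (l : List Char) (comb : List Char) :
    l.foldl (fun combination letter =>
      (t9Keys.foldl (fun (p : List Char × Int) key =>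
          (if key.contains letter then p.1 ++ PySem.Int.toChars p.2 else p.1, p.2 + 1))
        (combination, 2)).1) comb
    = l.foldl t9Step comb := by
  have h : (fun combination letter =>
      (t9Keys.foldl (fun (p : List Char × Int) key =>
          (if key.contains letter then p.1 ++ PySem.Int.toChars p.2 else p.1, p.2 + 1))
        (combination, 2)).1) = t9Step := by
    funext comb c
    exact t9_inner comb c
  rw [h]

-- ===== VERDICT (by name: the statement is the Claim_ definition above) =====
theorem T9_spec : Claim_equal_T9 := by
  intro word _
  unfold Spec_T9 T9 T9_alt
  simp only [t9_outer]
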